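-- pv_equiv track=rewrite | github.com/yezyvibe/Algorithm_PS | 실력확인/nc2.py | solution
-- ===== SOURCE A (Python) =====
-- from collections import deque
--
-- def bfs(s, e, adj):
--     q = deque([(s, 0)])
--     visit = [0] * (13)
--     visit[s] = 1
--     while q:
--         x, cnt = q.popleft()
--         if x == e:
--             return cnt
--         for k in adj[x]:
--             if not visit[k]:
--                 q.append((k, cnt + 1))
--                 visit[k] = 1
--
-- def solution(music):
--     adj = [[], [2, 3], [1, 3], [1, 2, 4, 5], [3, 5], [3, 4, 6, 7],  #12345
--     [5, 7], [5, 6, 8], [7, 9, 10], [8, 10], [8, 9, 11, 12], [10, 12], [10, 11]] # 6789101112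
--
--     # 1부터 시작
--     answer = 0
--     for i in range(len(music)):
--         if i == 0:
--             answer = bfs(1, music[i], adj)
--             continue
--         answer += bfs(music[i-1], music[i], adj)
--     return answer
-- ===== SOURCE B (Python) =====
-- def solution(music):
--     adj = [[], [2, 3], [1, 3], [1, 2, 4, 5], [3, 5], [3, 4, 6, 7],
--            [5, 7], [5, 6, 8], [7, 9, 10], [8, 10], [8, 9, 11, 12], [10, 12], [10, 11]]
--     # all-pairs shortest distances once (Floyd-Warshall), then sum table lookups
--     dist = [[0 if i == j else 99 for j in range(13)] for i in range(13)]
--     for i in range(13):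
--         for j in adj[i]:
--             dist[i][j] = 1
--     for k in range(13):
--         for i in range(13):
--             for j in range(13):
--                 alt = dist[i][k] + dist[k][j]
--                 if alt < dist[i][j]:
--                     dist[i][j] = alt
--     total = 0
--     prev = 1
--     for x in music:
--         total += dist[prev][x]
--         prev = x
--     return total
-- ===== Notes on version B (the rewrite author's own statement) =====
-- stated objective: alternative
-- what changed: Replaces the per-pair BFS with one Floyd-Warshall all-pairs distance table computed once, then a single pass over music summing table lookups.
-- outside the precondition, e.g. on solution([0]): A returns None, B returns 99; on solution([-5]): A returns None, B returns 4
import Mathlib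
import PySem

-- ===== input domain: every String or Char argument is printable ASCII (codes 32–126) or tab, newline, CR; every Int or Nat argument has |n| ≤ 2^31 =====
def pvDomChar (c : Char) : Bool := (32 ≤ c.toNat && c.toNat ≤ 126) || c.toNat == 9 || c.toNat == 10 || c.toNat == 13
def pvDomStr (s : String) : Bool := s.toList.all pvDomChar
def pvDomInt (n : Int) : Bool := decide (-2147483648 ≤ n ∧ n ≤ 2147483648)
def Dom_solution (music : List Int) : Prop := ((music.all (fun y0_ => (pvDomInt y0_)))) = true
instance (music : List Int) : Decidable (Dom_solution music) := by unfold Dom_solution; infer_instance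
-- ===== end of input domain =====

-- B replaces A's per-step BFS by a Floyd-Warshall all-pairs table built once plus a single summing pass (alternative algorithm, same results).

-- ===== PORT A =====
-- the fixed adjacency list of A
def adjA : List (List Int) :=
  [[], [2, 3], [1, 3], [1, 2, 4, 5], [3, 5], [3, 4, 6, 7],
   [5, 7], [5, 6, 8], [7, 9, 10], [8, 10], [8, 9, 11, 12], [10, 12], [10, 11]]

-- the 'while q' loop of bfs; fuel only makes the recursion structural (13 pops always suffice:
-- every enqueued node is marked visited, 13 nodes), the computation is the same
def bfsLoop : Nat → List (Int × Int) → List Int → Int → List (List Int) → Option Int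
  | 0, _, _, _, _ => none
  | _ + 1, [], _, _, _ => none   -- queue exhausted: Python's bfs falls off the end, returns None
  | fuel + 1, (x, cnt) :: q, visit, e, adj =>
    if x = e then some cnt
    else
      let st := (PySem.List.pyGetD adj x []).foldl
        (fun (st : List (Int × Int) × List Int) k =>
          if PySem.List.pyGetD st.2 k 0 = 0 then
            (st.1 ++ [(k, cnt + 1)], PySem.List.pySetD st.2 k 1)
          else st) (q, visit)
      bfsLoop fuel st.1 st.2 e adj

def bfsA (s e : Int) (adj : List (List Int)) : Option Int :=
  bfsLoop 13 [(s, 0)] (PySem.List.pySetD (List.replicate 13 (0 : Int)) s 1) e adj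

-- solution: Option Int models the running 'answer' (none = the value whose later addition raises); Pre_ excludes those inputs
def solution (music : List Int) : Int :=
  ((PySem.List.pyRange 0 music.length 1).foldl
    (fun (answer : Option Int) i =>
      if i = 0 then bfsA 1 (PySem.List.pyGetD music i 0) adjA
      else do
        let a ← answer
        let d ← bfsA (PySem.List.pyGetD music (i - 1) 0) (PySem.List.pyGetD music i 0) adjA
        pure (a + d)) (some 0)).getD 0

-- ===== PORT B =====
-- Source B's own copy of the fixed adjacency list
def adjB : List (List Int) :=
  [[], [2, 3], [1, 3], [1, 2, 4, 5], [3, 5], [3, 4, 6, 7],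
   [5, 7], [5, 6, 8], [7, 9, 10], [8, 10], [8, 9, 11, 12], [10, 12], [10, 11]]

def d0B : List (List Int) :=
  (PySem.List.pyRange 0 13 1).map (fun i => (PySem.List.pyRange 0 13 1).map (fun j => if i = j then (0 : Int) else 99))

def d1B : List (List Int) :=
  (PySem.List.pyRange 0 13 1).foldl (fun d i =>
      (PySem.List.pyGetD adjB i []).foldl (fun d j =>
        PySem.List.pySetD d i (PySem.List.pySetD (PySem.List.pyGetD d i []) j 1)) d) d0B

def fwRound (d : List (List Int)) (k : Int) : List (List Int) :=
  (PySem.List.pyRange 0 13 1).foldl (fun d i =>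
    (PySem.List.pyRange 0 13 1).foldl (fun d j =>
      let alt := PySem.List.pyGetD (PySem.List.pyGetD d i []) k 99 +
                 PySem.List.pyGetD (PySem.List.pyGetD d k []) j 99
      if alt < PySem.List.pyGetD (PySem.List.pyGetD d i []) j 99 then
        PySem.List.pySetD d i (PySem.List.pySetD (PySem.List.pyGetD d i []) j alt)
      else d) d) d

def distB : List (List Int) := (PySem.List.pyRange 0 13 1).foldl fwRound d1B

def solution_alt (music : List Int) : Int :=
  (music.foldl
    (fun (st : Int × Int) x =>
      (st.1 + PySem.List.pyGetD (PySem.List.pyGetD distB st.2 []) x 0, x))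
    (0, 1)).1

-- ===== PRECONDITION & SPEC =====
-- Pre_ excludes lists with an element outside 1..12: there A either raises (TypeError/IndexError)
-- or returns None (not an int) — never an ordinary integer.
def Pre_solution (music : List Int) : Prop := ∀ m ∈ music, 1 ≤ m ∧ m ≤ 12
instance (music : List Int) : Decidable (Pre_solution music) := by unfold Pre_solution; infer_instance
def pvWitness_solution : List Int := [3, 7, 1, 12]

def Spec_solution (music : List Int) (out : Int) : Prop := out = solution_alt music
instance (music : List Int) (out : Int) : Decidable (Spec_solution music out) := by unfold Spec_solution; infer_instance

-- ===== CLAIM (what is proved, stated in full; the proofs are below) =====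
def Claim_equal_solution : Prop := ∀ (music : List Int), Dom_solution music → Pre_solution music → Spec_solution music (solution music)

-- ===== LEMMAS AND PROOFS =====

def T0 : List (List Int) := [[0, 99, 99, 99, 99, 99, 99, 99, 99, 99, 99, 99, 99], [99, 0, 1, 1, 99, 99, 99, 99, 99, 99, 99, 99, 99], [99, 1, 0, 1, 99, 99, 99, 99, 99, 99, 99, 99, 99], [99, 1, 1, 0, 1, 1, 99, 99, 99, 99, 99, 99, 99], [99, 99, 99, 1, 0, 1, 99, 99, 99, 99, 99, 99, 99], [99, 99, 99, 1, 1, 0, 1, 1, 99, 99, 99, 99, 99], [99, 99, 99, 99, 99, 1, 0, 1, 99, 99, 99, 99, 99], [99, 99, 99, 99, 99, 1, 1, 0, 1, 99, 99, 99, 99], [99, 99, 99, 99, 99, 99, 99, 1, 0, 1, 1, 99, 99], [99, 99, 99, 99, 99, 99, 99, 99, 1, 0, 1, 99, 99], [99, 99, 99, 99, 99, 99, 99, 99, 1, 1, 0, 1, 1], [99, 99, 99, 99, 99, 99, 99, 99, 99, 99, 1, 0, 1], [99, 99, 99, 99, 99, 99, 99, 99, 99, 99, 1, 1, 0]]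
def T1 : List (List Int) := [[0, 99, 99, 99, 99, 99, 99, 99, 99, 99, 99, 99, 99], [99, 0, 1, 1, 99, 99, 99, 99, 99, 99, 99, 99, 99], [99, 1, 0, 1, 99, 99, 99, 99, 99, 99, 99, 99, 99], [99, 1, 1, 0, 1, 1, 99, 99, 99, 99, 99, 99, 99], [99, 99, 99, 1, 0, 1, 99, 99, 99, 99, 99, 99, 99], [99, 99, 99, 1, 1, 0, 1, 1, 99, 99, 99, 99, 99], [99, 99, 99, 99, 99, 1, 0, 1, 99, 99, 99, 99, 99], [99, 99, 99, 99, 99, 1, 1, 0, 1, 99, 99, 99, 99], [99, 99, 99, 99, 99, 99, 99, 1, 0, 1, 1, 99, 99], [99, 99, 99, 99, 99, 99, 99, 99, 1, 0, 1, 99, 99], [99, 99, 99, 99, 99, 99, 99, 99, 1, 1, 0, 1, 1], [99, 99, 99, 99, 99, 99, 99, 99, 99, 99, 1, 0, 1], [99, 99, 99, 99, 99, 99, 99, 99, 99, 99, 1, 1, 0]]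
def T2 : List (List Int) := [[0, 99, 99, 99, 99, 99, 99, 99, 99, 99, 99, 99, 99], [99, 0, 1, 1, 99, 99, 99, 99, 99, 99, 99, 99, 99], [99, 1, 0, 1, 99, 99, 99, 99, 99, 99, 99, 99, 99], [99, 1, 1, 0, 1, 1, 99, 99, 99, 99, 99, 99, 99], [99, 99, 99, 1, 0, 1, 99, 99, 99, 99, 99, 99, 99], [99, 99, 99, 1, 1, 0, 1, 1, 99, 99, 99, 99, 99], [99, 99, 99, 99, 99, 1, 0, 1, 99, 99, 99, 99, 99], [99, 99, 99, 99, 99, 1, 1, 0, 1, 99, 99, 99, 99], [99, 99, 99, 99, 99, 99, 99, 1, 0, 1, 1, 99, 99], [99, 99, 99, 99, 99, 99, 99, 99, 1, 0, 1, 99, 99], [99, 99, 99, 99, 99, 99, 99, 99, 1, 1, 0, 1, 1], [99, 99, 99, 99, 99, 99, 99, 99, 99, 99, 1, 0, 1], [99, 99, 99, 99, 99, 99, 99, 99, 99, 99, 1, 1, 0]]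
def T3 : List (List Int) := [[0, 99, 99, 99, 99, 99, 99, 99, 99, 99, 99, 99, 99], [99, 0, 1, 1, 99, 99, 99, 99, 99, 99, 99, 99, 99], [99, 1, 0, 1, 99, 99, 99, 99, 99, 99, 99, 99, 99], [99, 1, 1, 0, 1, 1, 99, 99, 99, 99, 99, 99, 99], [99, 99, 99, 1, 0, 1, 99, 99, 99, 99, 99, 99, 99], [99, 99, 99, 1, 1, 0, 1, 1, 99, 99, 99, 99, 99], [99, 99, 99, 99, 99, 1, 0, 1, 99, 99, 99, 99, 99], [99, 99, 99, 99, 99, 1, 1, 0, 1, 99, 99, 99, 99], [99, 99, 99, 99, 99, 99, 99, 1, 0, 1, 1, 99, 99], [99, 99, 99, 99, 99, 99, 99, 99, 1, 0, 1, 99, 99], [99, 99, 99, 99, 99, 99, 99, 99, 1, 1, 0, 1, 1], [99, 99, 99, 99, 99, 99, 99, 99, 99, 99, 1, 0, 1], [99, 99, 99, 99, 99, 99, 99, 99, 99, 99, 1, 1, 0]]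
def T4 : List (List Int) := [[0, 99, 99, 99, 99, 99, 99, 99, 99, 99, 99, 99, 99], [99, 0, 1, 1, 2, 2, 99, 99, 99, 99, 99, 99, 99], [99, 1, 0, 1, 2, 2, 99, 99, 99, 99, 99, 99, 99], [99, 1, 1, 0, 1, 1, 99, 99, 99, 99, 99, 99, 99], [99, 2, 2, 1, 0, 1, 99, 99, 99, 99, 99, 99, 99], [99, 2, 2, 1, 1, 0, 1, 1, 99, 99, 99, 99, 99], [99, 99, 99, 99, 99, 1, 0, 1, 99, 99, 99, 99, 99], [99, 99, 99, 99, 99, 1, 1, 0, 1, 99, 99, 99, 99], [99, 99, 99, 99, 99, 99, 99, 1, 0, 1, 1, 99, 99], [99, 99, 99, 99, 99, 99, 99, 99, 1, 0, 1, 99, 99], [99, 99, 99, 99, 99, 99, 99, 99, 1, 1, 0, 1, 1], [99, 99, 99, 99, 99, 99, 99, 99, 99, 99, 1, 0, 1], [99, 99, 99, 99, 99, 99, 99, 99, 99, 99, 1, 1, 0]]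
def T5 : List (List Int) := [[0, 99, 99, 99, 99, 99, 99, 99, 99, 99, 99, 99, 99], [99, 0, 1, 1, 2, 2, 99, 99, 99, 99, 99, 99, 99], [99, 1, 0, 1, 2, 2, 99, 99, 99, 99, 99, 99, 99], [99, 1, 1, 0, 1, 1, 99, 99, 99, 99, 99, 99, 99], [99, 2, 2, 1, 0, 1, 99, 99, 99, 99, 99, 99, 99], [99, 2, 2, 1, 1, 0, 1, 1, 99, 99, 99, 99, 99], [99, 99, 99, 99, 99, 1, 0, 1, 99, 99, 99, 99, 99], [99, 99, 99, 99, 99, 1, 1, 0, 1, 99, 99, 99, 99], [99, 99, 99, 99, 99, 99, 99, 1, 0, 1, 1, 99, 99], [99, 99, 99, 99, 99, 99, 99, 99, 1, 0, 1, 99, 99], [99, 99, 99, 99, 99, 99, 99, 99, 1, 1, 0, 1, 1], [99, 99, 99, 99, 99, 99, 99, 99, 99, 99, 1, 0, 1], [99, 99, 99, 99, 99, 99, 99, 99, 99, 99, 1, 1, 0]]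
def T6 : List (List Int) := [[0, 99, 99, 99, 99, 99, 99, 99, 99, 99, 99, 99, 99], [99, 0, 1, 1, 2, 2, 3, 3, 99, 99, 99, 99, 99], [99, 1, 0, 1, 2, 2, 3, 3, 99, 99, 99, 99, 99], [99, 1, 1, 0, 1, 1, 2, 2, 99, 99, 99, 99, 99], [99, 2, 2, 1, 0, 1, 2, 2, 99, 99, 99, 99, 99], [99, 2, 2, 1, 1, 0, 1, 1, 99, 99, 99, 99, 99], [99, 3, 3, 2, 2, 1, 0, 1, 99, 99, 99, 99, 99], [99, 3, 3, 2, 2, 1, 1, 0, 1, 99, 99, 99, 99], [99, 99, 99, 99, 99, 99, 99, 1, 0, 1, 1, 99, 99], [99, 99, 99, 99, 99, 99, 99, 99, 1, 0, 1, 99, 99], [99, 99, 99, 99, 99, 99, 99, 99, 1, 1, 0, 1, 1], [99, 99, 99, 99, 99, 99, 99, 99, 99, 99, 1, 0, 1], [99, 99, 99, 99, 99, 99, 99, 99, 99, 99, 1, 1, 0]]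
def T7 : List (List Int) := [[0, 99, 99, 99, 99, 99, 99, 99, 99, 99, 99, 99, 99], [99, 0, 1, 1, 2, 2, 3, 3, 99, 99, 99, 99, 99], [99, 1, 0, 1, 2, 2, 3, 3, 99, 99, 99, 99, 99], [99, 1, 1, 0, 1, 1, 2, 2, 99, 99, 99, 99, 99], [99, 2, 2, 1, 0, 1, 2, 2, 99, 99, 99, 99, 99], [99, 2, 2, 1, 1, 0, 1, 1, 99, 99, 99, 99, 99], [99, 3, 3, 2, 2, 1, 0, 1, 99, 99, 99, 99, 99], [99, 3, 3, 2, 2, 1, 1, 0, 1, 99, 99, 99, 99], [99, 99, 99, 99, 99, 99, 99, 1, 0, 1, 1, 99, 99], [99, 99, 99, 99, 99, 99, 99, 99, 1, 0, 1, 99, 99], [99, 99, 99, 99, 99, 99, 99, 99, 1, 1, 0, 1, 1], [99, 99, 99, 99, 99, 99, 99, 99, 99, 99, 1, 0, 1], [99, 99, 99, 99, 99, 99, 99, 99, 99, 99, 1, 1, 0]]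
def T8 : List (List Int) := [[0, 99, 99, 99, 99, 99, 99, 99, 99, 99, 99, 99, 99], [99, 0, 1, 1, 2, 2, 3, 3, 4, 99, 99, 99, 99], [99, 1, 0, 1, 2, 2, 3, 3, 4, 99, 99, 99, 99], [99, 1, 1, 0, 1, 1, 2, 2, 3, 99, 99, 99, 99], [99, 2, 2, 1, 0, 1, 2, 2, 3, 99, 99, 99, 99], [99, 2, 2, 1, 1, 0, 1, 1, 2, 99, 99, 99, 99], [99, 3, 3, 2, 2, 1, 0, 1, 2, 99, 99, 99, 99], [99, 3, 3, 2, 2, 1, 1, 0, 1, 99, 99, 99, 99], [99, 4, 4, 3, 3, 2, 2, 1, 0, 1, 1, 99, 99], [99, 99, 99, 99, 99, 99, 99, 99, 1, 0, 1, 99, 99], [99, 99, 99, 99, 99, 99, 99, 99, 1, 1, 0, 1, 1], [99, 99, 99, 99, 99, 99, 99, 99, 99, 99, 1, 0, 1], [99, 99, 99, 99, 99, 99, 99, 99, 99, 99, 1, 1, 0]]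
def T9 : List (List Int) := [[0, 99, 99, 99, 99, 99, 99, 99, 99, 99, 99, 99, 99], [99, 0, 1, 1, 2, 2, 3, 3, 4, 5, 5, 99, 99], [99, 1, 0, 1, 2, 2, 3, 3, 4, 5, 5, 99, 99], [99, 1, 1, 0, 1, 1, 2, 2, 3, 4, 4, 99, 99], [99, 2, 2, 1, 0, 1, 2, 2, 3, 4, 4, 99, 99], [99, 2, 2, 1, 1, 0, 1, 1, 2, 3, 3, 99, 99], [99, 3, 3, 2, 2, 1, 0, 1, 2, 3, 3, 99, 99], [99, 3, 3, 2, 2, 1, 1, 0, 1, 2, 2, 99, 99], [99, 4, 4, 3, 3, 2, 2, 1, 0, 1, 1, 99, 99], [99, 5, 5, 4, 4, 3, 3, 2, 1, 0, 1, 99, 99], [99, 5, 5, 4, 4, 3, 3, 2, 1, 1, 0, 1, 1], [99, 99, 99, 99, 99, 99, 99, 99, 99, 99, 1, 0, 1], [99, 99, 99, 99, 99, 99, 99, 99, 99, 99, 1, 1, 0]]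
def T10 : List (List Int) := [[0, 99, 99, 99, 99, 99, 99, 99, 99, 99, 99, 99, 99], [99, 0, 1, 1, 2, 2, 3, 3, 4, 5, 5, 99, 99], [99, 1, 0, 1, 2, 2, 3, 3, 4, 5, 5, 99, 99], [99, 1, 1, 0, 1, 1, 2, 2, 3, 4, 4, 99, 99], [99, 2, 2, 1, 0, 1, 2, 2, 3, 4, 4, 99, 99], [99, 2, 2, 1, 1, 0, 1, 1, 2, 3, 3, 99, 99], [99, 3, 3, 2, 2, 1, 0, 1, 2, 3, 3, 99, 99], [99, 3, 3, 2, 2, 1, 1, 0, 1, 2, 2, 99, 99], [99, 4, 4, 3, 3, 2, 2, 1, 0, 1, 1, 99, 99], [99, 5, 5, 4, 4, 3, 3, 2, 1, 0, 1, 99, 99], [99, 5, 5, 4, 4, 3, 3, 2, 1, 1, 0, 1, 1], [99, 99, 99, 99, 99, 99, 99, 99, 99, 99, 1, 0, 1], [99, 99, 99, 99, 99, 99, 99, 99, 99, 99, 1, 1, 0]]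
def T11 : List (List Int) := [[0, 99, 99, 99, 99, 99, 99, 99, 99, 99, 99, 99, 99], [99, 0, 1, 1, 2, 2, 3, 3, 4, 5, 5, 6, 6], [99, 1, 0, 1, 2, 2, 3, 3, 4, 5, 5, 6, 6], [99, 1, 1, 0, 1, 1, 2, 2, 3, 4, 4, 5, 5], [99, 2, 2, 1, 0, 1, 2, 2, 3, 4, 4, 5, 5], [99, 2, 2, 1, 1, 0, 1, 1, 2, 3, 3, 4, 4], [99, 3, 3, 2, 2, 1, 0, 1, 2, 3, 3, 4, 4], [99, 3, 3, 2, 2, 1, 1, 0, 1, 2, 2, 3, 3], [99, 4, 4, 3, 3, 2, 2, 1, 0, 1, 1, 2, 2], [99, 5, 5, 4, 4, 3, 3, 2, 1, 0, 1, 2, 2], [99, 5, 5, 4, 4, 3, 3, 2, 1, 1, 0, 1, 1], [99, 6, 6, 5, 5, 4, 4, 3, 2, 2, 1, 0, 1], [99, 6, 6, 5, 5, 4, 4, 3, 2, 2, 1, 1, 0]]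
def T12 : List (List Int) := [[0, 99, 99, 99, 99, 99, 99, 99, 99, 99, 99, 99, 99], [99, 0, 1, 1, 2, 2, 3, 3, 4, 5, 5, 6, 6], [99, 1, 0, 1, 2, 2, 3, 3, 4, 5, 5, 6, 6], [99, 1, 1, 0, 1, 1, 2, 2, 3, 4, 4, 5, 5], [99, 2, 2, 1, 0, 1, 2, 2, 3, 4, 4, 5, 5], [99, 2, 2, 1, 1, 0, 1, 1, 2, 3, 3, 4, 4], [99, 3, 3, 2, 2, 1, 0, 1, 2, 3, 3, 4, 4], [99, 3, 3, 2, 2, 1, 1, 0, 1, 2, 2, 3, 3], [99, 4, 4, 3, 3, 2, 2, 1, 0, 1, 1, 2, 2], [99, 5, 5, 4, 4, 3, 3, 2, 1, 0, 1, 2, 2], [99, 5, 5, 4, 4, 3, 3, 2, 1, 1, 0, 1, 1], [99, 6, 6, 5, 5, 4, 4, 3, 2, 2, 1, 0, 1], [99, 6, 6, 5, 5, 4, 4, 3, 2, 2, 1, 1, 0]]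
def T13 : List (List Int) := [[0, 99, 99, 99, 99, 99, 99, 99, 99, 99, 99, 99, 99], [99, 0, 1, 1, 2, 2, 3, 3, 4, 5, 5, 6, 6], [99, 1, 0, 1, 2, 2, 3, 3, 4, 5, 5, 6, 6], [99, 1, 1, 0, 1, 1, 2, 2, 3, 4, 4, 5, 5], [99, 2, 2, 1, 0, 1, 2, 2, 3, 4, 4, 5, 5], [99, 2, 2, 1, 1, 0, 1, 1, 2, 3, 3, 4, 4], [99, 3, 3, 2, 2, 1, 0, 1, 2, 3, 3, 4, 4], [99, 3, 3, 2, 2, 1, 1, 0, 1, 2, 2, 3, 3], [99, 4, 4, 3, 3, 2, 2, 1, 0, 1, 1, 2, 2], [99, 5, 5, 4, 4, 3, 3, 2, 1, 0, 1, 2, 2], [99, 5, 5, 4, 4, 3, 3, 2, 1, 1, 0, 1, 1], [99, 6, 6, 5, 5, 4, 4, 3, 2, 2, 1, 0, 1], [99, 6, 6, 5, 5, 4, 4, 3, 2, 2, 1, 1, 0]]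

set_option maxRecDepth 60000 in
theorem hT0 : d1B = T0 := by decide
set_option maxRecDepth 60000 in
theorem hT1 : fwRound T0 0 = T1 := by decide
set_option maxRecDepth 60000 in
theorem hT2 : fwRound T1 1 = T2 := by decide
set_option maxRecDepth 60000 in
theorem hT3 : fwRound T2 2 = T3 := by decide
set_option maxRecDepth 60000 in
theorem hT4 : fwRound T3 3 = T4 := by decide
set_option maxRecDepth 60000 in
theorem hT5 : fwRound T4 4 = T5 := by decide
set_option maxRecDepth 60000 in
theorem hT6 : fwRound T5 5 = T6 := by decide
set_option maxRecDepth 60000 in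
theorem hT7 : fwRound T6 6 = T7 := by decide
set_option maxRecDepth 60000 in
theorem hT8 : fwRound T7 7 = T8 := by decide
set_option maxRecDepth 60000 in
theorem hT9 : fwRound T8 8 = T9 := by decide
set_option maxRecDepth 60000 in
theorem hT10 : fwRound T9 9 = T10 := by decide
set_option maxRecDepth 60000 in
theorem hT11 : fwRound T10 10 = T11 := by decide
set_option maxRecDepth 60000 in
theorem hT12 : fwRound T11 11 = T12 := by decide
set_option maxRecDepth 60000 in
theorem hT13 : fwRound T12 12 = T13 := by decide

theorem hr : PySem.List.pyRange 0 13 1 = [0,1,2,3,4,5,6,7,8,9,10,11,12] := by decide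

theorem distB_eq : distB = T13 := by
  calc distB = List.foldl fwRound T0 [0,1,2,3,4,5,6,7,8,9,10,11,12] := by
        rw [show distB = List.foldl fwRound d1B (PySem.List.pyRange 0 13 1) from rfl, hr, hT0]
    _ = List.foldl fwRound T1 [1,2,3,4,5,6,7,8,9,10,11,12] := by rw [List.foldl_cons, hT1]
    _ = List.foldl fwRound T2 [2,3,4,5,6,7,8,9,10,11,12] := by rw [List.foldl_cons, hT2]
    _ = List.foldl fwRound T3 [3,4,5,6,7,8,9,10,11,12] := by rw [List.foldl_cons, hT3]
    _ = List.foldl fwRound T4 [4,5,6,7,8,9,10,11,12] := by rw [List.foldl_cons, hT4]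
    _ = List.foldl fwRound T5 [5,6,7,8,9,10,11,12] := by rw [List.foldl_cons, hT5]
    _ = List.foldl fwRound T6 [6,7,8,9,10,11,12] := by rw [List.foldl_cons, hT6]
    _ = List.foldl fwRound T7 [7,8,9,10,11,12] := by rw [List.foldl_cons, hT7]
    _ = List.foldl fwRound T8 [8,9,10,11,12] := by rw [List.foldl_cons, hT8]
    _ = List.foldl fwRound T9 [9,10,11,12] := by rw [List.foldl_cons, hT9]
    _ = List.foldl fwRound T10 [10,11,12] := by rw [List.foldl_cons, hT10]
    _ = List.foldl fwRound T11 [11,12] := by rw [List.foldl_cons, hT11]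
    _ = List.foldl fwRound T12 [12] := by rw [List.foldl_cons, hT12]
    _ = List.foldl fwRound T13 [] := by rw [List.foldl_cons, hT13]
    _ = T13 := rfl

set_option maxRecDepth 60000 in
theorem bfsL1 : ∀ e ∈ PySem.List.pyRange 1 13 1, bfsA 1 e adjA = some (PySem.List.pyGetD (PySem.List.pyGetD T13 1 []) e 0) := by decide
set_option maxRecDepth 60000 in
theorem bfsL2 : ∀ e ∈ PySem.List.pyRange 1 13 1, bfsA 2 e adjA = some (PySem.List.pyGetD (PySem.List.pyGetD T13 2 []) e 0) := by decide
set_option maxRecDepth 60000 in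
theorem bfsL3 : ∀ e ∈ PySem.List.pyRange 1 13 1, bfsA 3 e adjA = some (PySem.List.pyGetD (PySem.List.pyGetD T13 3 []) e 0) := by decide
set_option maxRecDepth 60000 in
theorem bfsL4 : ∀ e ∈ PySem.List.pyRange 1 13 1, bfsA 4 e adjA = some (PySem.List.pyGetD (PySem.List.pyGetD T13 4 []) e 0) := by decide
set_option maxRecDepth 60000 in
theorem bfsL5 : ∀ e ∈ PySem.List.pyRange 1 13 1, bfsA 5 e adjA = some (PySem.List.pyGetD (PySem.List.pyGetD T13 5 []) e 0) := by decide
set_option maxRecDepth 60000 in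
theorem bfsL6 : ∀ e ∈ PySem.List.pyRange 1 13 1, bfsA 6 e adjA = some (PySem.List.pyGetD (PySem.List.pyGetD T13 6 []) e 0) := by decide
set_option maxRecDepth 60000 in
theorem bfsL7 : ∀ e ∈ PySem.List.pyRange 1 13 1, bfsA 7 e adjA = some (PySem.List.pyGetD (PySem.List.pyGetD T13 7 []) e 0) := by decide
set_option maxRecDepth 60000 in
theorem bfsL8 : ∀ e ∈ PySem.List.pyRange 1 13 1, bfsA 8 e adjA = some (PySem.List.pyGetD (PySem.List.pyGetD T13 8 []) e 0) := by decide
set_option maxRecDepth 60000 in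
theorem bfsL9 : ∀ e ∈ PySem.List.pyRange 1 13 1, bfsA 9 e adjA = some (PySem.List.pyGetD (PySem.List.pyGetD T13 9 []) e 0) := by decide
set_option maxRecDepth 60000 in
theorem bfsL10 : ∀ e ∈ PySem.List.pyRange 1 13 1, bfsA 10 e adjA = some (PySem.List.pyGetD (PySem.List.pyGetD T13 10 []) e 0) := by decide
set_option maxRecDepth 60000 in
theorem bfsL11 : ∀ e ∈ PySem.List.pyRange 1 13 1, bfsA 11 e adjA = some (PySem.List.pyGetD (PySem.List.pyGetD T13 11 []) e 0) := by decide
set_option maxRecDepth 60000 in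
theorem bfsL12 : ∀ e ∈ PySem.List.pyRange 1 13 1, bfsA 12 e adjA = some (PySem.List.pyGetD (PySem.List.pyGetD T13 12 []) e 0) := by decide

theorem bfs_eq_lit : ∀ s ∈ PySem.List.pyRange 1 13 1, ∀ e ∈ PySem.List.pyRange 1 13 1,
    bfsA s e adjA = some (PySem.List.pyGetD (PySem.List.pyGetD T13 s []) e 0) := by
  intro s hs
  rw [PySem.List.mem_pyRange_one] at hs
  obtain ⟨h1, h2⟩ := hs
  interval_cases s
  exacts [bfsL1, bfsL2, bfsL3, bfsL4, bfsL5, bfsL6, bfsL7, bfsL8, bfsL9, bfsL10, bfsL11, bfsL12]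


-- shorthand for B's table lookup (proof-side only)
def tbl (s e : Int) : Int := PySem.List.pyGetD (PySem.List.pyGetD distB s []) e 0

-- A's bfs agrees with B's table on every in-range pair (finite check)
theorem bfs_eq_tbl : ∀ s ∈ PySem.List.pyRange 1 13 1, ∀ e ∈ PySem.List.pyRange 1 13 1,
    bfsA s e adjA = some (tbl s e) := by
  intro s hs e he
  simp only [tbl, distB_eq]
  exact bfs_eq_lit s hs e he

theorem loopA (music : List Int) (hpre : Pre_solution music) :
    ∀ (xs : List Int) (i prev t : Int), 1 ≤ i → music.drop i.toNat = xs →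
      music[i.toNat - 1]? = some prev →
      (PySem.List.pyRange i music.length 1).foldl
        (fun (answer : Option Int) j =>
          if j = 0 then bfsA 1 (PySem.List.pyGetD music j 0) adjA
          else do
            let a ← answer
            let d ← bfsA (PySem.List.pyGetD music (j - 1) 0) (PySem.List.pyGetD music j 0) adjA
            pure (a + d)) (some t)
      = some ((xs.foldl (fun (st : Int × Int) x => (st.1 + tbl st.2 x, x)) (t, prev)).1) := by
  intro xs
  induction xs with
  | nil =>
    intro i prev t hi hdrop hprev
    have hlen : (music.length : Int) ≤ i := by
      have := List.drop_eq_nil_iff.mp hdrop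
      omega
    rw [PySem.List.pyRange_one_eq_nil hlen]
    simp
  | cons x xs ih =>
    intro i prev t hi hdrop hprev
    have h0 : (0 : Int) ≤ i := by omega
    have hlt : i.toNat < music.length := by
      by_contra h
      rw [List.drop_eq_nil_iff.mpr (by omega)] at hdrop
      simp at hdrop
    have hltI : i < (music.length : Int) := by omega
    have hx : music[i.toNat] = x := by
      have h := List.drop_eq_getElem_cons hlt
      rw [hdrop] at h
      injection h with h1 _
      exact h1.symm
    have hget_i : PySem.List.pyGetD music i 0 = x := by
      rw [PySem.List.pyGetD_eq_getElem music 0 h0 hltI]; exact hx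
    have hprev_val : music[i.toNat - 1] = prev := by
      have hlt' : i.toNat - 1 < music.length := by omega
      simpa [List.getElem?_eq_getElem hlt'] using hprev
    have hget_im1 : PySem.List.pyGetD music (i - 1) 0 = prev := by
      have h0' : (0 : Int) ≤ i - 1 := by omega
      have hlt' : i - 1 < (music.length : Int) := by omega
      rw [PySem.List.pyGetD_eq_getElem music 0 h0' hlt']
      have hidx : (i - 1).toNat = i.toNat - 1 := by omega
      have h1 : music[(i - 1).toNat]? = music[i.toNat - 1]? := by rw [hidx]
      have hlt'' : (i - 1).toNat < music.length := by omega
      have h2 := h1.trans hprev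
      rw [List.getElem?_eq_getElem hlt''] at h2
      exact Option.some.inj h2
    have hprev_mem : prev ∈ music := by rw [← hprev_val]; exact List.getElem_mem _
    have hx_mem : x ∈ music := by rw [← hx]; exact List.getElem_mem _
    have hprev_rng : prev ∈ PySem.List.pyRange 1 13 1 := by
      rw [PySem.List.mem_pyRange_one]
      have := hpre prev hprev_mem; omega
    have hx_rng : x ∈ PySem.List.pyRange 1 13 1 := by
      rw [PySem.List.mem_pyRange_one]
      have := hpre x hx_mem; omega
    rw [PySem.List.pyRange_one_cons hltI]
    simp only [List.foldl_cons]
    have hne : ¬ (i = 0) := by omega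
    rw [if_neg hne, hget_i, hget_im1, bfs_eq_tbl prev hprev_rng x hx_rng]
    have hstep : (do
        let a ← some t
        let d ← some (tbl prev x)
        pure (a + d) : Option Int) = some (t + tbl prev x) := rfl
    rw [hstep]
    have hdrop' : music.drop (i + 1).toNat = xs := by
      have h1 : (i + 1).toNat = i.toNat + 1 := by omega
      have h2 := congrArg (List.drop 1) hdrop
      rw [List.drop_drop] at h2
      rw [h1]
      simpa [Nat.add_comm] using h2
    have hprev' : music[(i + 1).toNat - 1]? = some x := by
      have h3 : (i + 1).toNat - 1 = i.toNat := by omega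
      rw [h3, List.getElem?_eq_getElem hlt]
      exact congrArg some hx
    rw [ih (i + 1) x (t + tbl prev x) (by omega) hdrop' hprev']

-- ===== VERDICT (by name: the statement is the Claim_ definition above) =====
theorem solution_spec : Claim_equal_solution := by
  intro music _hdom hpre
  unfold Spec_solution
  cases music with
  | nil => decide
  | cons x xs =>
    have hx_rng : x ∈ PySem.List.pyRange 1 13 1 := by
      rw [PySem.List.mem_pyRange_one]
      have := hpre x (List.mem_cons_self ..); omega
    unfold solution solution_alt
    have hlen : (0 : Int) < ((x :: xs).length : Int) := by
      simp
    rw [PySem.List.pyRange_one_cons hlen]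
    have hget0 : PySem.List.pyGetD (x :: xs) (0 : Int) 0 = x := PySem.List.pyGetD_zero_cons ..
    simp only [List.foldl_cons, reduceIte, zero_add, hget0,
      bfs_eq_tbl 1 (by decide) x hx_rng]
    have hdrop : (x :: xs).drop (1 : Int).toNat = xs := rfl
    have hprev : (x :: xs)[(1 : Int).toNat - 1]? = some x := rfl
    rw [loopA (x :: xs) hpre xs 1 x (tbl 1 x) (by omega) hdrop hprev]
    simp [tbl]
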